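-- pv_equiv track=rewrite | github.com/ruth-hanna/clinvar_snps | annotate_clinvar_snps.py | CountPAMs
-- ===== SOURCE A (Python) =====
-- def CountPAMs(sequence,pam):
-- 	# Takes in sequence (5' to 3') and a PAM to search for.
-- 	# Outputs a list of PAM locations, where the location indicates the 5' end of the PAM.
-- 	# CountPAMs is agnostic to strand.
-- 	# To find PAMs in the antisense strand, CountPAMs takes in the reverse complement (5' to 3') and outputs the 5' location of the PAM in the antisense strand.
--
-- 	nucleotide_codes_dict = {'A':{'A'},
-- 	'C':{'C'},
-- 	'G':{'G'},
-- 	'T':{'T'},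
-- 	'R':{'A','G'},
-- 	'Y':{'C','T'},
-- 	'W':{'A','T'},
-- 	'S':{'G','C'},
-- 	'M':{'A','C'},
-- 	'K':{'G','T'},
-- 	'B':{'G','C','T'},
-- 	'H':{'A','C','T'},
-- 	'D':{'A','G','T'},
-- 	'V':{'A','G','C'},
-- 	'N':{'A','G','C','T'},}
--
-- 	pam_location_list = []
-- 	for base in range(0, len(sequence)+1-len(pam)):
-- 		for i in range (0, len(pam)):
-- 			nucleotide = sequence[base+i]
-- 			pam_allowed_nucleotides = nucleotide_codes_dict[pam[i]]
-- 			pam_found = True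
-- 			if nucleotide not in pam_allowed_nucleotides:
-- 				pam_found = False
-- 				break
-- 		if pam_found == True:
-- 			pam_location_list.append(base)
-- 	return pam_location_list
-- ===== SOURCE B (Python) =====
-- def CountPAMs(sequence, pam):
--     # Bitmask reformulation: each IUPAC code becomes a 4-bit nucleotide mask; the
--     # candidate start positions are filtered one PAM position at a time.
--     iupac_mask = {'A': 1, 'C': 2, 'G': 4, 'T': 8,
--                   'R': 5, 'Y': 10, 'W': 9, 'S': 6, 'M': 3, 'K': 12,
--                   'B': 14, 'H': 11, 'D': 13, 'V': 7, 'N': 15}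
--     base_mask = {'A': 1, 'C': 2, 'G': 4, 'T': 8}
--     pam_masks = [iupac_mask[c] for c in pam]
--     seq_masks = [base_mask.get(c, 0) for c in sequence]
--     candidates = list(range(len(sequence) + 1 - len(pam)))
--     for i, mask in enumerate(pam_masks):
--         candidates = [b for b in candidates if seq_masks[b + i] & mask]
--     return candidates
-- ===== Notes on version B (the rewrite author's own statement) =====
-- stated objective: alternative
-- what changed: A slides a window and tests each window character against a dict of Python sets with a break flag; B compiles the PAM once into 4-bit IUPAC bitmasks, precomputes a mask per sequence character, and filters the list of candidate start positions one PAM position at a time with a bitwise AND.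
-- outside the precondition, e.g. on CountPAMs('AG', 'VG9'): A returns [], B raises KeyError
import Mathlib
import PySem

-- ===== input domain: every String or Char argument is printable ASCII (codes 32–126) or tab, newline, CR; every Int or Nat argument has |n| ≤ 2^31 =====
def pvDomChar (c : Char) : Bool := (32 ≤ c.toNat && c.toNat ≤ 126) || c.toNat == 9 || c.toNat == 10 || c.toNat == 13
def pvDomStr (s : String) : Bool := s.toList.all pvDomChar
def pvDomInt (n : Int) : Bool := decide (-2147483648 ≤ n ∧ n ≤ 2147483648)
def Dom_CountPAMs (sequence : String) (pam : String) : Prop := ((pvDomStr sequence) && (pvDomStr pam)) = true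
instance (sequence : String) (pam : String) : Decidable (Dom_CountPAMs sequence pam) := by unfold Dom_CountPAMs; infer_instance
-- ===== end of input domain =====

-- B replaces A's per-window set-membership scan by bitmasks: the PAM is compiled once
-- to 4-bit nucleotide masks and candidate start positions are filtered one PAM position
-- at a time (alternative decomposition, same asymptotic cost).


-- ===== PORT A =====
-- nucleotide_codes_dict of A (dict of Python sets)
def pvCodesA : PySem.Dict Char (PySem.Set Char) := PySem.Dict.ofList
  [('A', PySem.Set.ofList ['A']),
   ('C', PySem.Set.ofList ['C']),
   ('G', PySem.Set.ofList ['G']),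
   ('T', PySem.Set.ofList ['T']),
   ('R', PySem.Set.ofList ['A','G']),
   ('Y', PySem.Set.ofList ['C','T']),
   ('W', PySem.Set.ofList ['A','T']),
   ('S', PySem.Set.ofList ['G','C']),
   ('M', PySem.Set.ofList ['A','C']),
   ('K', PySem.Set.ofList ['G','T']),
   ('B', PySem.Set.ofList ['G','C','T']),
   ('H', PySem.Set.ofList ['A','C','T']),
   ('D', PySem.Set.ofList ['A','G','T']),
   ('V', PySem.Set.ofList ['A','G','C']),
   ('N', PySem.Set.ofList ['A','G','C','T'])]

-- inner 'for i in range(0, len(pam))' loop of A, with its break; the Bool argument is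
-- the pam_found flag carried in from the previous outer iteration (Python leftover
-- state); the pyGetD/getD defaults are never reached on inputs admitted by Pre_.
def pvInnerA (seq : List Char) (pamL : List Char) (base : Int) : Bool → List Int → Bool
  | pf, [] => pf
  | _, i :: rest =>
      let nucleotide := PySem.List.pyGetD seq (base + i) ' '
      let allowed := PySem.Dict.getD pvCodesA (PySem.List.pyGetD pamL i ' ') PySem.Set.empty
      if PySem.Set.contains allowed nucleotide then pvInnerA seq pamL base true rest
      else false

def CountPAMs (sequence : String) (pam : String) : List Int :=
  let seq := sequence.toList
  let pamL := pam.toList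
  ((PySem.List.pyRange 0 ((seq.length : Int) + 1 - (pamL.length : Int))).foldl
    (fun st base =>
      let pf := pvInnerA seq pamL base st.2 (PySem.List.pyRange 0 ((pamL.length : Int)))
      if pf then (st.1 ++ [base], pf) else (st.1, pf))
    (([] : List Int), false)).1

-- ===== PORT B =====
def pvIupacMask : PySem.Dict Char Int := PySem.Dict.ofList
  [('A',1),('C',2),('G',4),('T',8),('R',5),('Y',10),('W',9),('S',6),('M',3),('K',12),
   ('B',14),('H',11),('D',13),('V',7),('N',15)]

def pvBaseMask : PySem.Dict Char Int := PySem.Dict.ofList [('A',1),('C',2),('G',4),('T',8)]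

-- Source B: iupac_mask[c] raises KeyError on an unknown code — excluded by Pre_; the
-- getD default 0 there and in seq_masks[b+i] is never reached on admitted inputs.
-- Python's '&' on ints is Int.land.
def CountPAMs_alt (sequence : String) (pam : String) : List Int :=
  let pamMasks := pam.toList.map (fun c => PySem.Dict.getD pvIupacMask c 0)
  let seqMasks := sequence.toList.map (fun c => PySem.Dict.getD pvBaseMask c 0)
  let candidates := PySem.List.pyRange 0 ((sequence.toList.length : Int) + 1 - (pam.toList.length : Int))
  (PySem.List.enumerate pamMasks).foldl
    (fun cands im =>
      cands.filter (fun b => decide (Int.land (PySem.List.pyGetD seqMasks (b + im.1) 0) im.2 ≠ 0)))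
    candidates

-- ===== PRECONDITION & SPEC =====
-- Pre_ excludes an empty pam (A raises NameError: pam_found is never assigned) and a
-- pam containing a non-IUPAC character: there A raises KeyError on the first window
-- that reaches the bad character, or returns lazily if no window does, while B compiles
-- the whole pam up front and always raises KeyError.
def Pre_CountPAMs (sequence : String) (pam : String) : Prop :=
  pam ≠ "" ∧ pam.toList.all (fun c => (['A','C','G','T','R','Y','W','S','M','K','B','H','D','V','N'] : List Char).contains c) = true
instance (sequence : String) (pam : String) : Decidable (Pre_CountPAMs sequence pam) := by
  unfold Pre_CountPAMs; infer_instance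

def pvWitness_CountPAMs : String × String := ("ACGTAGG", "NGG")

def Spec_CountPAMs (sequence : String) (pam : String) (out : List Int) : Prop := out = CountPAMs_alt sequence pam
instance (sequence : String) (pam : String) (out : List Int) : Decidable (Spec_CountPAMs sequence pam out) := by unfold Spec_CountPAMs; infer_instance

-- ===== CLAIM (what is proved, stated in full; the proofs are below) =====
def Claim_equal_CountPAMs : Prop := ∀ (sequence : String) (pam : String), Dom_CountPAMs sequence pam → Pre_CountPAMs sequence pam → Spec_CountPAMs sequence pam (CountPAMs sequence pam)

-- ===== LEMMAS AND PROOFS =====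

-- the per-position check both inner loops compute, in A's vocabulary
def pvCheckA (seq pamL : List Char) (base : Int) (i : Int) : Bool :=
  PySem.Set.contains (PySem.Dict.getD pvCodesA (PySem.List.pyGetD pamL i ' ') PySem.Set.empty)
    (PySem.List.pyGetD seq (base + i) ' ')

lemma pvInnerA_pf_irrel (seq pamL : List Char) (base : Int) (pf pf' : Bool)
    (i : Int) (rest : List Int) :
    pvInnerA seq pamL base pf (i :: rest) = pvInnerA seq pamL base pf' (i :: rest) := rfl

lemma pvInnerA_eq_all (seq pamL : List Char) (base : Int) (is : List Int) :
    pvInnerA seq pamL base true is = is.all (pvCheckA seq pamL base) := by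
  induction is with
  | nil => rfl
  | cons i rest ih =>
      show (if pvCheckA seq pamL base i then pvInnerA seq pamL base true rest else false)
          = (i :: rest).all (pvCheckA seq pamL base)
      rw [List.all_cons]
      cases h : pvCheckA seq pamL base i with
      | false => simp
      | true => simp [ih]

-- the outer fold of A collects exactly the bases on which the inner loop ends true
lemma pvFoldA (seq pamL : List Char) (R : List Int) (hR : R ≠ []) :
    ∀ (l : List Int) (acc : List Int) (pf : Bool),
      (l.foldl (fun st base =>
          let pf := pvInnerA seq pamL base st.2 R
          if pf then (st.1 ++ [base], pf) else (st.1, pf)) (acc, pf)).1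
      = acc ++ l.filter (fun b => pvInnerA seq pamL b true R) := by
  intro l
  induction l with
  | nil => intro acc pf; simp
  | cons b t ih =>
      intro acc pf
      obtain ⟨i, rest, rfl⟩ : ∃ i rest, R = i :: rest := by
        cases R with
        | nil => exact absurd rfl hR
        | cons i rest => exact ⟨i, rest, rfl⟩
      rw [List.foldl_cons, List.filter_cons]
      dsimp only
      rw [pvInnerA_pf_irrel seq pamL b pf true]
      cases h : pvInnerA seq pamL b true (i :: rest) with
      | false => simp only [Bool.false_eq_true, if_false, ih]
      | true =>
          simp only [if_true, ih]
          simp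

-- iterated filtering equals one filter by the conjunction
lemma pvFoldFilter {α β : Type} (g : β → α → Bool) :
    ∀ (xs : List β) (l : List α),
      xs.foldl (fun c im => c.filter (fun b => g im b)) l
        = l.filter (fun b => xs.all (fun im => g im b)) := by
  intro xs
  induction xs with
  | nil => intro l; simp
  | cons x t ih =>
      intro l
      rw [List.foldl_cons, ih, List.filter_filter]
      apply List.filter_congr
      intro b _
      simp [Bool.and_comm]

lemma pvAllCongrMem {α : Type} {l : List α} {p q : α → Bool}
    (h : ∀ a ∈ l, p a = q a) : l.all p = l.all q := by
  induction l with
  | nil => rfl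
  | cons a t ih =>
      rw [List.all_cons, List.all_cons, h a (List.mem_cons_self),
        ih (fun a ha => h a (List.mem_cons_of_mem _ ha))]

lemma pvIntZeroLand (m : Int) : Int.land 0 m = 0 := by
  cases m <;> simp [Int.land, Nat.ldiff]

-- the per-character fact linking A's sets to B's bitmasks, for every IUPAC code
lemma pvCharMatch (code c : Char)
    (h : code ∈ (['A','C','G','T','R','Y','W','S','M','K','B','H','D','V','N'] : List Char)) :
    PySem.Set.contains (PySem.Dict.getD pvCodesA code PySem.Set.empty) c
      = decide (Int.land (PySem.Dict.getD pvBaseMask c 0) (PySem.Dict.getD pvIupacMask code 0) ≠ 0) := by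
  by_cases hA : c = 'A'
  · subst hA; fin_cases h <;> decide
  by_cases hC : c = 'C'
  · subst hC; fin_cases h <;> decide
  by_cases hG : c = 'G'
  · subst hG; fin_cases h <;> decide
  by_cases hT : c = 'T'
  · subst hT; fin_cases h <;> decide
  -- c is not a concrete nucleotide: both sides are false
  have hbm : PySem.Dict.getD pvBaseMask c 0 = 0 := by
    apply PySem.Dict.getD_of_not_contains
    rw [PySem.Dict.contains_eq_decide_mem_keys]
    have hk : pvBaseMask.keys = ['A','C','G','T'] := by decide
    simp [hk, hA, hC, hG, hT]
  rw [hbm, pvIntZeroLand]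
  have e0 : PySem.Dict.getD pvCodesA 'A' PySem.Set.empty = (['A'] : PySem.Set Char) := by decide
  have e1 : PySem.Dict.getD pvCodesA 'C' PySem.Set.empty = (['C'] : PySem.Set Char) := by decide
  have e2 : PySem.Dict.getD pvCodesA 'G' PySem.Set.empty = (['G'] : PySem.Set Char) := by decide
  have e3 : PySem.Dict.getD pvCodesA 'T' PySem.Set.empty = (['T'] : PySem.Set Char) := by decide
  have e4 : PySem.Dict.getD pvCodesA 'R' PySem.Set.empty = (['A','G'] : PySem.Set Char) := by decide
  have e5 : PySem.Dict.getD pvCodesA 'Y' PySem.Set.empty = (['C','T'] : PySem.Set Char) := by decide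
  have e6 : PySem.Dict.getD pvCodesA 'W' PySem.Set.empty = (['A','T'] : PySem.Set Char) := by decide
  have e7 : PySem.Dict.getD pvCodesA 'S' PySem.Set.empty = (['G','C'] : PySem.Set Char) := by decide
  have e8 : PySem.Dict.getD pvCodesA 'M' PySem.Set.empty = (['A','C'] : PySem.Set Char) := by decide
  have e9 : PySem.Dict.getD pvCodesA 'K' PySem.Set.empty = (['G','T'] : PySem.Set Char) := by decide
  have e10 : PySem.Dict.getD pvCodesA 'B' PySem.Set.empty = (['G','C','T'] : PySem.Set Char) := by decide
  have e11 : PySem.Dict.getD pvCodesA 'H' PySem.Set.empty = (['A','C','T'] : PySem.Set Char) := by decide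
  have e12 : PySem.Dict.getD pvCodesA 'D' PySem.Set.empty = (['A','G','T'] : PySem.Set Char) := by decide
  have e13 : PySem.Dict.getD pvCodesA 'V' PySem.Set.empty = (['A','G','C'] : PySem.Set Char) := by decide
  have e14 : PySem.Dict.getD pvCodesA 'N' PySem.Set.empty = (['A','G','C','T'] : PySem.Set Char) := by decide
  fin_cases h <;> simp only [e0, e1, e2, e3, e4, e5, e6, e7, e8, e9, e10, e11, e12, e13, e14] <;>
    simp [hA, hC, hG, hT]

-- rewriting B's precomputed mask lists back to per-character lookups
lemma pvGetD_iupacMap (xs : List Char) (i : Int) :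
    PySem.List.pyGetD (xs.map (fun c => PySem.Dict.getD pvIupacMask c 0)) i 0
      = PySem.Dict.getD pvIupacMask (PySem.List.pyGetD xs i ' ') 0 := by
  have h := PySem.List.pyGetD_map (fun c => PySem.Dict.getD pvIupacMask c 0) xs i ' '
  simpa using h

lemma pvGetD_baseMap (xs : List Char) (i : Int) :
    PySem.List.pyGetD (xs.map (fun c => PySem.Dict.getD pvBaseMask c 0)) i 0
      = PySem.Dict.getD pvBaseMask (PySem.List.pyGetD xs i ' ') 0 := by
  have h := PySem.List.pyGetD_map (fun c => PySem.Dict.getD pvBaseMask c 0) xs i ' '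
  simpa using h

-- ===== VERDICT (by name: the statement is the Claim_ definition above) =====
theorem CountPAMs_spec : Claim_equal_CountPAMs := by
  intro s p _ hpre
  obtain ⟨hne, hcodes0⟩ := hpre
  have hcodes : ∀ c ∈ p.toList, c ∈ (['A','C','G','T','R','Y','W','S','M','K','B','H','D','V','N'] : List Char) := by
    simpa using hcodes0
  show CountPAMs s p = CountPAMs_alt s p
  have hm : p.toList ≠ [] := fun h => hne (String.toList_eq_nil_iff.mp h)
  have hmpos : (0 : Int) < (p.toList.length : Int) := by
    cases hl : p.toList with
    | nil => exact absurd hl hm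
    | cons a t => simp
  have hR : PySem.List.pyRange 0 ((p.toList.length : Int)) ≠ [] := by
    rw [PySem.List.pyRange_one_cons hmpos]; simp
  -- A's closed form
  rw [CountPAMs]
  rw [pvFoldA s.toList p.toList _ hR]
  -- B's closed form
  rw [CountPAMs_alt]
  rw [PySem.List.enumerate_eq_map_pyRange _ (0 : Int), List.foldl_map]
  rw [pvFoldFilter (fun (j : Int) (b : Int) =>
      decide (Int.land (PySem.List.pyGetD (s.toList.map (fun c => PySem.Dict.getD pvBaseMask c 0)) (b + j) 0)
        (PySem.List.pyGetD (p.toList.map (fun c => PySem.Dict.getD pvIupacMask c 0)) j 0) ≠ 0))]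
  simp only [PySem.List.len_eq, List.length_map, List.nil_append]
  -- pointwise agreement of the two filter predicates
  apply List.filter_congr
  intro b _
  rw [pvInnerA_eq_all]
  apply pvAllCongrMem
  intro j hj
  have hjr : (0 : Int) ≤ j ∧ j < (p.toList.length : Int) := by
    have := (PySem.List.mem_pyRange_one).mp hj
    exact this
  have hin : PySem.Raise.InRange p.toList.length j := by
    simp only [PySem.Raise.InRange]
    omega
  have hcode : PySem.List.pyGetD p.toList j ' ' ∈ p.toList :=
    PySem.List.pyGetD_mem p.toList ' ' hin
  rw [pvGetD_iupacMap, pvGetD_baseMap]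
  exact pvCharMatch _ _ (hcodes _ hcode)
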